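-- pv_equiv track=rewrite | github.com/MahmoudAljamal92/quran-qsf | tools/f55_forgery_demo.py | apply_edit
-- ===== SOURCE A (Python) =====
-- def apply_edit(text: str, position: int, new_letter: str) -> str:
--     """Replace the letter at the given character position with new_letter.
--     Position is 0-indexed over the normalized text. Spaces are skipped (we only edit letters).
--     """
--     letters = [c for c in text if c != " "]
--     if position < 0 or position >= len(letters):
--         raise ValueError(f"Position {position} out of range (text has {len(letters)} letters)")
--     letters[position] = new_letter
--     # Rebuild text with original spacing
--     out = []
--     li = 0
--     for c in text:
--         if c == " ":
--             out.append(" ")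
--         else:
--             out.append(letters[li])
--             li += 1
--     return "".join(out)
-- ===== SOURCE B (Python) =====
-- def apply_edit(text: str, position: int, new_letter: str) -> str:
--     # One pass: locate the text index of the position-th non-space char while counting all of them.
--     idx = -1
--     count = 0
--     for i, c in enumerate(text):
--         if c != " ":
--             if count == position:
--                 idx = i
--             count += 1
--     if position < 0 or idx < 0:
--         raise ValueError(f"Position {position} out of range (text has {count} letters)")
--     return text[:idx] + new_letter + text[idx + 1:]
-- ===== Notes on version B (the rewrite author's own statement) =====
-- stated objective: alternative
-- what changed: B replaces A's three-stage filter-into-a-letters-list / assign / spacing-aware rebuild loop by a single enumerate scan that records the text index of the position-th non-space character (while counting all of them for the error message) and splices new_letter in with string slicing.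
import Mathlib
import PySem

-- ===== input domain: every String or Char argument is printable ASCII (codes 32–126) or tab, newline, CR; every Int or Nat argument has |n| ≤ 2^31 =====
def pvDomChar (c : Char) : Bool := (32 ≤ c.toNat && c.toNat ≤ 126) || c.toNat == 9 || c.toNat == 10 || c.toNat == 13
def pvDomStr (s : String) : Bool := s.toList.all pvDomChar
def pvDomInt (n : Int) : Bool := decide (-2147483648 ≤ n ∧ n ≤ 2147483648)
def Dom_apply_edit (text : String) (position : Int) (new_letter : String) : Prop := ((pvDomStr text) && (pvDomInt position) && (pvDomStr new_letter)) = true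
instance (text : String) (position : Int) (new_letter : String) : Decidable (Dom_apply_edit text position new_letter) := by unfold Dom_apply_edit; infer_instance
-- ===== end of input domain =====

-- B replaces A's filter-edit-rebuild (a letters list, an assignment into it and a second spacing-aware
-- rebuild loop) by one scan that locates the target's text index plus a slice splice; objective:
-- alternative decomposition, same O(n) cost.

-- ===== PORT A =====
-- A's rebuild loop 'for c in text: … out.append(…)' with state (out, li); out is built by structural recursion
def pvRebuildA (letters : List String) : List Char → Nat → List String
  | [], _ => []
  | c :: cs, li =>
    if c = ' ' then " " :: pvRebuildA letters cs li
    else letters.getD li "" :: pvRebuildA letters cs (li + 1)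

def apply_edit (text : String) (position : Int) (new_letter : String) : String :=
  let letters : List String := (text.toList.filter (fun c => c != ' ')).map (fun c => String.ofList [c])
  if position < 0 ∨ (letters.length : Int) ≤ position then
    ""   -- Python raises ValueError here; these inputs are excluded by Pre_apply_edit
  else
    PySem.Str.join "" (pvRebuildA (letters.set position.toNat new_letter) text.toList 0)

-- ===== PORT B =====
-- B's single 'for i, c in enumerate(text)' loop with state (idx, count)
def pvScanB (position : Int) : List Char → Nat → Int × Int → Int × Int
  | [], _, st => st
  | c :: cs, i, (idx, count) =>
    if c != ' ' then
      pvScanB position cs (i + 1) ((if count = position then (i : Int) else idx), count + 1)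
    else
      pvScanB position cs (i + 1) (idx, count)

def apply_edit_alt (text : String) (position : Int) (new_letter : String) : String :=
  let st := pvScanB position text.toList 0 (-1, 0)
  if position < 0 ∨ st.1 < 0 then
    ""   -- Python raises ValueError here; these inputs are excluded by Pre_apply_edit
  else
    String.ofList (text.toList.take st.1.toNat) ++ new_letter
      ++ String.ofList (text.toList.drop (st.1.toNat + 1))

-- ===== PRECONDITION & SPEC =====
-- Pre_ excludes exactly the inputs on which A raises ValueError (position outside the range of
-- non-space characters); B raises the same ValueError there.
def Pre_apply_edit (text : String) (position : Int) (new_letter : String) : Prop :=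
  0 ≤ position ∧ position < ((text.toList.filter (fun c => c != ' ')).length : Int)
instance (text : String) (position : Int) (new_letter : String) : Decidable (Pre_apply_edit text position new_letter) := by unfold Pre_apply_edit; infer_instance

def pvWitness_apply_edit : String × Int × String := ("ab c", 2, "X")

def Spec_apply_edit (text : String) (position : Int) (new_letter : String) (out : String) : Prop := out = apply_edit_alt text position new_letter
instance (text : String) (position : Int) (new_letter : String) (out : String) : Decidable (Spec_apply_edit text position new_letter out) := by unfold Spec_apply_edit; infer_instance

-- ===== CLAIM (what is proved, stated in full; the proofs are below) =====
def Claim_equal_apply_edit : Prop := ∀ (text : String) (position : Int) (new_letter : String), Dom_apply_edit text position new_letter → Pre_apply_edit text position new_letter → Spec_apply_edit text position new_letter (apply_edit text position new_letter)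

-- ===== LEMMAS AND PROOFS =====

-- index (in l) of the p-th non-space character of l, if any
def pvLocate : List Char → Int → Option Nat
  | [], _ => none
  | c :: cs, p =>
    if c = ' ' then (pvLocate cs p).map (· + 1)
    else if p = 0 then some 0 else (pvLocate cs (p - 1)).map (· + 1)

lemma pvLocate_neg : ∀ (l : List Char) (p : Int), p < 0 → pvLocate l p = none := by
  intro l
  induction l with
  | nil => intro p _; rfl
  | cons c cs ih =>
    intro p hp
    simp only [pvLocate]
    split_ifs with h1 h2
    · rw [ih p hp]; rfl
    · omega
    · rw [ih (p - 1) (by omega)]; rfl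

lemma pvLocate_isSome : ∀ (l : List Char) (p : Int), 0 ≤ p →
    p < ((l.filter (fun c => c != ' ')).length : Int) → (pvLocate l p).isSome := by
  intro l
  induction l with
  | nil => intro p h0 hlt; simp at hlt; omega
  | cons c cs ih =>
    intro p h0 hlt
    by_cases hc : c = ' '
    · rw [List.filter_cons, if_neg (by simp [hc])] at hlt
      simp only [pvLocate, if_pos hc, Option.isSome_map]
      exact ih p h0 hlt
    · rw [List.filter_cons, if_pos (by simp [hc]), List.length_cons] at hlt
      simp only [pvLocate, if_neg hc]
      by_cases hp : p = 0
      · simp [hp]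
      · simp only [if_neg hp, Option.isSome_map]
        exact ih (p - 1) (by omega) (by push_cast at hlt ⊢; omega)

lemma pvScanB_spec : ∀ (l : List Char) (p : Int) (i : Nat) (idx count : Int),
    pvScanB p l i (idx, count) =
      ((match pvLocate l (p - count) with
         | some j => (i : Int) + j
         | none => idx),
       count + ((l.filter (fun c => c != ' ')).length : Int)) := by
  intro l
  induction l with
  | nil => intro p i idx count; simp [pvScanB, pvLocate]
  | cons c cs ih =>
    intro p i idx count
    by_cases hc : c = ' '
    · have hstep : pvScanB p (c :: cs) i (idx, count) = pvScanB p cs (i + 1) (idx, count) := by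
        simp [pvScanB, hc]
      have hf : (c :: cs).filter (fun c => c != ' ') = cs.filter (fun c => c != ' ') := by
        simp [hc]
      rw [hstep, ih, hf]
      simp only [pvLocate, if_pos hc]
      cases h : pvLocate cs (p - count) <;> simp <;> ring_nf
    · have hstep : pvScanB p (c :: cs) i (idx, count)
          = pvScanB p cs (i + 1) ((if count = p then (i : Int) else idx), count + 1) := by
        simp [pvScanB, hc]
      have hf : (c :: cs).filter (fun c => c != ' ') = c :: cs.filter (fun c => c != ' ') := by
        simp [hc]
      rw [hstep, ih, hf, List.length_cons]
      simp only [pvLocate, if_neg hc]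
      by_cases hcp : count = p
      · rw [pvLocate_neg cs (p - (count + 1)) (by omega),
          if_pos (show p - count = 0 by omega)]
        simp only [if_pos hcp, Prod.mk.injEq]
        refine ⟨by push_cast; ring, by push_cast; ring⟩
      · rw [if_neg (show ¬ p - count = 0 by omega),
          show p - (count + 1) = p - count - 1 by ring]
        cases h : pvLocate cs (p - count - 1) <;> simp [hcp] <;> ring_nf <;> simp

lemma pvGetD_headD_drop (ls : List String) (i : Nat) :
    ls.getD i "" = (ls.drop i).headD "" := by
  simp [List.getD, List.head?_drop]

-- the rebuild loop, re-expressed as consuming the letters list from the front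
def pvRebuild2 : List String → List Char → List String
  | _, [] => []
  | ls, c :: cs => if c = ' ' then " " :: pvRebuild2 ls cs else ls.headD "" :: pvRebuild2 ls.tail cs

lemma pvRebuildA_eq : ∀ (l : List Char) (letters : List String) (li : Nat),
    pvRebuildA letters l li = pvRebuild2 (letters.drop li) l := by
  intro l
  induction l with
  | nil => intro letters li; rfl
  | cons c cs ih =>
    intro letters li
    by_cases hc : c = ' '
    · simp only [pvRebuildA, pvRebuild2, if_pos hc, ih]
    · simp only [pvRebuildA, pvRebuild2, if_neg hc, ih]
      rw [List.tail_drop, pvGetD_headD_drop]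

def pvSingles (l : List Char) : List String :=
  (l.filter (fun c => c != ' ')).map (fun c => String.ofList [c])

lemma pvJoin_nil_eq_flatten : ∀ ps : List (List Char), PySem.Chars.join [] ps = ps.flatten := by
  intro ps
  induction ps with
  | nil => rfl
  | cons a t ih =>
    cases t with
    | nil => rw [PySem.Chars.join_singleton]; simp
    | cons b u => rw [PySem.Chars.join_cons_cons]; simp_all

lemma pvRebuild2_ident : ∀ l : List Char,
    ((pvRebuild2 (pvSingles l) l).map String.toList).flatten = l := by
  intro l
  induction l with
  | nil => rfl
  | cons c cs ih =>
    by_cases hc : c = ' '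
    · have hs : pvSingles (c :: cs) = pvSingles cs := by simp [pvSingles, hc]
      rw [pvRebuild2, if_pos hc, hs]
      simp only [List.map_cons, List.flatten_cons, ih]
      rw [hc, show (" " : String).toList = [' '] from rfl]
      rfl
    · have hs : pvSingles (c :: cs) = String.ofList [c] :: pvSingles cs := by
        simp [pvSingles, hc]
      rw [pvRebuild2, if_neg hc, hs]
      simp [ih]

lemma pvRebuild2_set : ∀ (l : List Char) (p : Int) (j : Nat) (new : String),
    pvLocate l p = some j →
    ((pvRebuild2 ((pvSingles l).set p.toNat new) l).map String.toList).flatten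
      = l.take j ++ new.toList ++ l.drop (j + 1) := by
  intro l
  induction l with
  | nil => intro p j new h; simp [pvLocate] at h
  | cons c cs ih =>
    intro p j new h
    by_cases hc : c = ' '
    · have hs : pvSingles (c :: cs) = pvSingles cs := by simp [pvSingles, hc]
      rw [pvLocate, if_pos hc] at h
      obtain ⟨j', hj', rfl⟩ := Option.map_eq_some_iff.mp h
      rw [pvRebuild2, if_pos hc, hs]
      simp only [List.map_cons, List.flatten_cons, ih p j' new hj']
      rw [hc, show (" " : String).toList = [' '] from rfl,
        List.take_succ_cons, List.drop_succ_cons]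
      simp
    · have hs : pvSingles (c :: cs) = String.ofList [c] :: pvSingles cs := by
        simp [pvSingles, hc]
      rw [pvLocate, if_neg hc] at h
      by_cases hp : p = 0
      · rw [if_pos hp] at h
        obtain rfl : j = 0 := by simpa using h.symm
        rw [pvRebuild2, if_neg hc, hs, hp,
          show (0 : Int).toNat = 0 from rfl, List.set_cons_zero]
        simp [pvRebuild2_ident cs]
      · rw [if_neg hp] at h
        obtain ⟨j', hj', rfl⟩ := Option.map_eq_some_iff.mp h
        have hpos : 0 < p := by
          by_contra hneg
          rw [pvLocate_neg cs (p - 1) (by omega)] at hj'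
          simp at hj'
        rw [pvRebuild2, if_neg hc, hs,
          show p.toNat = (p - 1).toNat + 1 by omega, List.set_cons_succ,
          List.take_succ_cons, List.drop_succ_cons]
        simp only [List.headD_cons, List.tail_cons, List.map_cons, List.flatten_cons,
          ih (p - 1) j' new hj']
        simp

-- ===== VERDICT (by name: the statement is the Claim_ definition above) =====
theorem apply_edit_spec : Claim_equal_apply_edit := by
  intro text position new_letter _dom hpre
  obtain ⟨h0, hlt⟩ := hpre
  obtain ⟨j, hj⟩ := Option.isSome_iff_exists.mp (pvLocate_isSome text.toList position h0 hlt)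
  have hj0 : (0 : Int) ≤ (j : Int) := Int.natCast_nonneg j
  unfold Spec_apply_edit apply_edit apply_edit_alt
  rw [pvScanB_spec]
  simp only [sub_zero, hj, Nat.cast_zero, zero_add]
  rw [if_neg (by simp only [List.length_map]; omega), if_neg (by omega)]
  rw [← String.toList_inj, PySem.Str.toList_join, pvRebuildA_eq, List.drop_zero,
    show ((text.toList.filter (fun c => c != ' ')).map (fun c => String.ofList [c]))
      = pvSingles text.toList from rfl,
    show ("" : String).toList = ([] : List Char) from rfl,
    pvJoin_nil_eq_flatten, pvRebuild2_set text.toList position j new_letter hj]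
  simp
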